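-- pv_equiv track=rewrite | github.com/captainanon/advent_of_code_2022 | day_10/puzzle_2.py | draw
-- ===== SOURCE A (Python) =====
-- def draw(cycle_list):
--     vert_pos = 0
--     hor_pos = 0
--     picture = ''
--     for sprite in cycle_list.values():
--         if (sprite - 1) == hor_pos or sprite == hor_pos or (sprite + 1) == hor_pos:
--             picture += '#'
--         else:
--             picture += '.'
--         hor_pos += 1
--         if hor_pos > 39:
--             picture += '\n'
--             vert_pos += 1
--             hor_pos = 0
--     return picture
-- ===== SOURCE B (Python) =====
-- def draw(cycle_list):
--     values = list(cycle_list.values())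
--     rows = []
--     while values:
--         chunk, values = values[:40], values[40:]
--         row = ''.join('#' if s - 1 == j or s == j or s + 1 == j else '.' for j, s in enumerate(chunk))
--         rows.append(row + '\n' if len(chunk) == 40 else row)
--     return ''.join(rows)
-- ===== Notes on version B (the rewrite author's own statement) =====
-- stated objective: alternative
-- what changed: B splits the sprite values into 40-wide row chunks first and renders each chunk as a whole row via enumerate, instead of A's single char-by-char sweep with a wrapping horizontal counter.
import Mathlib
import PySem

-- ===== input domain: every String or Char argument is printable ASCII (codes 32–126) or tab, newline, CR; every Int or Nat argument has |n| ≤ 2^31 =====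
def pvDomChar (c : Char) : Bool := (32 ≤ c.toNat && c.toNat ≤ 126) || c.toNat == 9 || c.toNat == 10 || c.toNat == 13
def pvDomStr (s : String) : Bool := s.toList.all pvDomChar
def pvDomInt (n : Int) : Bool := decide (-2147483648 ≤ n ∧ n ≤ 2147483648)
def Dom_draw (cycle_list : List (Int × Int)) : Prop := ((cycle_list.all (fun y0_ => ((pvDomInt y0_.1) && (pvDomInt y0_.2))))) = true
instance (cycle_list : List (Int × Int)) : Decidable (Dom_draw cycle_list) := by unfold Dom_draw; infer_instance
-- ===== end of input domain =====

-- B chunks the value list into 40-wide rows and renders row by row; A sweeps char by char with a wrapping counter (alternative decomposition).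

-- ===== PORT A =====
-- picture is built as a List Char and packed with String.mk at the end (exact: all output chars are ASCII '#', '.', '\n').
def drawA_loop (values : List Int) (vert hor : Int) (pic : List Char) : List Char :=
  match values with
  | [] => pic
  | sprite :: rest =>
    let pic1 := pic ++ [if sprite - 1 = hor ∨ sprite = hor ∨ sprite + 1 = hor then '#' else '.']
    let hor1 := hor + 1
    if hor1 > 39 then drawA_loop rest (vert + 1) 0 (pic1 ++ ['\n'])
    else drawA_loop rest vert hor1 pic1

-- cycle_list.values() on the association-list representation of the dict = map (·.2)
def draw (cycle_list : List (Int × Int)) : String :=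
  String.mk (drawA_loop (cycle_list.map (·.2)) 0 0 [])

-- ===== PORT B =====
-- one row: ''.join('#' if s-1==j or s==j or s+1==j else '.' for j, s in enumerate(chunk))
def drawRow (chunk : List Int) : List Char :=
  (PySem.List.enumerate chunk 0).map
    (fun js => if js.2 - 1 = js.1 ∨ js.2 = js.1 ∨ js.2 + 1 = js.1 then '#' else '.')

-- values[:40] / values[40:] with nonnegative literal bounds = take 40 / drop 40 (exact there)
def drawB_rows (values : List Int) : List Char :=
  match values with
  | [] => []
  | s :: rest =>
    let chunk := (s :: rest).take 40
    let vrest := (s :: rest).drop 40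
    let row := drawRow chunk
    (if chunk.length = 40 then row ++ ['\n'] else row) ++ drawB_rows vrest
termination_by values.length
decreasing_by simp

def draw_alt (cycle_list : List (Int × Int)) : String :=
  String.mk (drawB_rows (cycle_list.map (·.2)))

-- ===== PRECONDITION & SPEC =====
def Spec_draw (cycle_list : List (Int × Int)) (out : String) : Prop := out = draw_alt cycle_list
instance (cycle_list : List (Int × Int)) (out : String) : Decidable (Spec_draw cycle_list out) := by unfold Spec_draw; infer_instance

-- ===== CLAIM (what is proved, stated in full; the proofs are below) =====
def Claim_equal_draw : Prop := ∀ (cycle_list : List (Int × Int)), Dom_draw cycle_list → Spec_draw cycle_list (draw cycle_list)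

-- ===== LEMMAS AND PROOFS =====

/-- Row rendering with an explicit running index (proof-side view of `drawRow`). -/
def renderFrom (j : Int) : List Int → List Char
  | [] => []
  | s :: r => (if s - 1 = j ∨ s = j ∨ s + 1 = j then '#' else '.') :: renderFrom (j + 1) r

theorem drawRow_eq_renderFrom (chunk : List Int) :
    drawRow chunk = renderFrom 0 chunk := by
  suffices h : ∀ (c : List Int) (j : Int),
      (PySem.List.enumerate c j).map
        (fun js => if js.2 - 1 = js.1 ∨ js.2 = js.1 ∨ js.2 + 1 = js.1 then '#' else '.')
        = renderFrom j c from h chunk 0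
  intro c
  induction c with
  | nil => intro j; simp [PySem.List.enumerate_nil, renderFrom]
  | cons s r ih => intro j; simp [PySem.List.enumerate_cons, renderFrom, ih]

/-- One row of A's sweep, with `k` columns remaining in the current row. -/
theorem loopA_chunk (values : List Int) : ∀ (k : Nat) (j : Int) (vert : Int) (pic : List Char),
    0 < k → k ≤ 40 → j = 40 - (k : Int) →
    drawA_loop values vert j pic =
      if values.length < k then pic ++ renderFrom j values
      else drawA_loop (values.drop k) (vert + 1) 0 (pic ++ renderFrom j (values.take k) ++ ['\n']) := by
  induction values with
  | nil =>
    intro k j vert pic hk _ _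
    simp [drawA_loop, renderFrom, Nat.ne_zero_of_lt hk]
  | cons s rest ih =>
    intro k j vert pic hk hk40 hj
    rw [drawA_loop]
    by_cases h1 : k = 1
    · subst h1
      have hj39 : j = 39 := by omega
      subst hj39
      simp [renderFrom]
    · have hj39 : ¬ (j + 1 > 39) := by omega
      rw [if_neg hj39]
      rw [ih (k - 1) (j + 1) vert _ (by omega) (by omega) (by omega)]
      have hlen : (s :: rest).length < k ↔ rest.length < k - 1 := by simp; omega
      have htake : (s :: rest).take k = s :: rest.take (k - 1) := by
        conv_lhs => rw [show k = (k - 1) + 1 by omega]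
        simp
      have hdrop : (s :: rest).drop k = rest.drop (k - 1) := by
        conv_lhs => rw [show k = (k - 1) + 1 by omega]
        simp
      rw [htake, hdrop]
      by_cases h2 : rest.length < k - 1
      · rw [if_pos h2, if_pos (hlen.mpr h2)]
        simp [renderFrom]
      · rw [if_neg h2, if_neg (fun hc => h2 (hlen.mp hc))]
        simp [renderFrom]

theorem loopA_eq_rows (values : List Int) : ∀ (vert : Int) (pic : List Char),
    drawA_loop values vert 0 pic = pic ++ drawB_rows values := by
  induction values using drawB_rows.induct with
  | case1 => intro vert pic; simp [drawA_loop, drawB_rows]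
  | case2 s rest _ ih =>
    intro vert pic
    rw [loopA_chunk (s :: rest) 40 0 vert pic (by norm_num) le_rfl (by norm_num)]
    rw [drawB_rows, drawRow_eq_renderFrom]
    by_cases h : (s :: rest).length < 40
    · rw [if_pos h]
      have hdrop : (s :: rest).drop 40 = [] := by
        apply List.drop_eq_nil_of_le; omega
      have htake : (s :: rest).take 40 = s :: rest := by
        apply List.take_of_length_le; omega
      have hne : ¬ (s :: rest).length = 40 := by omega
      simp only [hdrop, drawB_rows, htake, List.append_nil]
      rw [if_neg hne]
    · rw [if_neg h]
      rw [ih (vert + 1) (pic ++ renderFrom 0 ((s :: rest).take 40) ++ ['\n'])]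
      have h40 : ((s :: rest).take 40).length = 40 := by
        simp only [List.length_cons] at h
        simp only [List.length_take, List.length_cons]; omega
      simp only [if_pos h40]
      simp
      rfl

-- ===== VERDICT (by name: the statement is the Claim_ definition above) =====
theorem draw_spec : Claim_equal_draw := by
  intro cycle_list _
  unfold Spec_draw draw draw_alt
  rw [loopA_eq_rows]
  simp
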